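-- pv_equiv track=rewrite | github.com/ravish-oo/arc-agi-opoch | equiv.py | relabel_stable
-- ===== SOURCE A (Python) =====
-- def relabel_stable(P: dict[tuple[int, int], int]) -> dict[tuple[int, int], int]:
--     """
--     Relabel partition blocks with stable 0..k-1 IDs.
--
--     Block IDs are assigned in deterministic order based on the
--     lexicographically smallest position in each block.
--
--     Args:
--         P: Input partition
--
--     Returns:
--         Partition with block IDs relabeled to 0..k-1
--
--     Examples:
--         >>> p = {(0,0): 5, (0,1): 5, (1,0): 3}
--         >>> relabeled = relabel_stable(p)
--         >>> relabeled[(0,0)] == relabeled[(0,1)]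
--         True
--         >>> relabeled[(0,0)] != relabeled[(1,0)]
--         True
--         >>> min(relabeled.values())
--         0
--     """
--     if not P:
--         return {}
--
--     # Group positions by block
--     blocks: dict[int, list[tuple[int, int]]] = {}
--     for pos, block_id in P.items():
--         if block_id not in blocks:
--             blocks[block_id] = []
--         blocks[block_id].append(pos)
--
--     # Sort blocks by their lexicographically smallest position
--     # This ensures deterministic ordering
--     block_representatives: list[tuple[tuple[int, int], int]] = []
--     for block_id, positions in blocks.items():
--         min_pos = min(positions)
--         block_representatives.append((min_pos, block_id))
--
--     block_representatives.sort()
--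
--     # Build mapping from old block_id to new stable block_id
--     old_to_new: dict[int, int] = {}
--     for new_id, (_, old_id) in enumerate(block_representatives):
--         old_to_new[old_id] = new_id
--
--     # Relabel
--     return {pos: old_to_new[block_id] for pos, block_id in P.items()}
-- ===== SOURCE B (Python) =====
-- def relabel_stable(P: dict[tuple[int, int], int]) -> dict[tuple[int, int], int]:
--     # Sort all items by position once; first appearance of a block id in that
--     # order is exactly its lexicographically smallest position, so assigning
--     # sequential ids on first sight reproduces the stable relabeling.
--     old_to_new: dict[int, int] = {}
--     for _pos, block_id in sorted(P.items()):
--         if block_id not in old_to_new: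
--             old_to_new[block_id] = len(old_to_new)
--     return {pos: old_to_new[block_id] for pos, block_id in P.items()}
-- ===== Notes on version B (the rewrite author's own statement) =====
-- stated objective: simpler
-- what changed: Instead of grouping positions per block, taking each group's min and sorting k representatives, B sorts all items by position once and assigns sequential new ids on first sight of each block id; Pre_ only states the dict invariant (unique position keys) that the list encoding must satisfy, so it excludes nothing a Python dict can be.
import Mathlib
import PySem

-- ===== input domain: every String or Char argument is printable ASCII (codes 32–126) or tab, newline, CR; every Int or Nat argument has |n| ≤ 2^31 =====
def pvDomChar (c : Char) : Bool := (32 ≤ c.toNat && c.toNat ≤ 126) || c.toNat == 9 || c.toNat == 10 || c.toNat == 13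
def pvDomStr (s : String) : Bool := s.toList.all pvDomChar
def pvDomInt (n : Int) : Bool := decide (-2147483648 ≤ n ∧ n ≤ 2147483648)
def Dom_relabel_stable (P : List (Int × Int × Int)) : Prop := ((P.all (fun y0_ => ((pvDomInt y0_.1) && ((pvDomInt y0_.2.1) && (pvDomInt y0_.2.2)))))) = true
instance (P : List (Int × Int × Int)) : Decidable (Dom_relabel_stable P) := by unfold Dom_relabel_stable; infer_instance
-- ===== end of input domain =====

-- B replaces A's group-by-block / per-group min / sort-of-representatives pipeline by one
-- sort of all items by position with a first-seen counter (objective: simpler).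
-- An entry (a, b, v) of the list encodes the dict item (a, b) ↦ v.

-- ===== PORT A =====
def relabel_stable (P : List (Int × Int × Int)) : List (Int × Int × Int) :=
  if P = [] then []
  else
    -- blocks: dict[int, list[tuple[int,int]]], grouping positions by block id
    let blocks : PySem.Dict Int (List (Int × Int)) :=
      P.foldl (fun d e =>
        let d1 := if d.contains e.2.2 then d else d.insert e.2.2 []
        d1.modify e.2.2 [] (fun l => l ++ [(e.1, e.2.1)])) PySem.Dict.empty
    -- min(positions): the groups are nonempty, so min? is some; the default (0,0) is unreachable
    let block_representatives : List ((Int × Int) × Int) :=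
      blocks.items.map (fun q =>
        ((PySem.List.min? q.2 (fun r => (toLex r : Int ×ₗ Int))).getD (0, 0), q.1))
    let sortedReps := PySem.List.sorted block_representatives
        (fun r => (toLex (toLex r.1, r.2) : (Int ×ₗ Int) ×ₗ Int))
    let old_to_new : PySem.Dict Int Int :=
      (PySem.List.enumerate sortedReps).foldl (fun d q => d.insert q.2.2 q.1) PySem.Dict.empty
    -- old_to_new[block_id]: every block id of P is a key, the default 0 is unreachable
    P.map (fun e => (e.1, e.2.1, old_to_new.getD e.2.2 0))

-- ===== PORT B =====
def relabel_stable_alt (P : List (Int × Int × Int)) : List (Int × Int × Int) :=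
  let sortedItems := PySem.List.sorted P
      (fun e => (toLex (toLex (e.1, e.2.1), e.2.2) : (Int ×ₗ Int) ×ₗ Int))
  let old_to_new : PySem.Dict Int Int :=
    sortedItems.foldl (fun d e =>
      if d.contains e.2.2 then d else d.insert e.2.2 (d.size : Int)) PySem.Dict.empty
  -- old_to_new[block_id]: every block id of P is a key, the default 0 is unreachable
  P.map (fun e => (e.1, e.2.1, old_to_new.getD e.2.2 0))

-- ===== PRECONDITION & SPEC =====
-- Pre_ states the dict invariant of the encoding: position keys are pairwise distinct
-- (a Python dict cannot carry duplicate keys, so no input A accepts is excluded).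
def Pre_relabel_stable (P : List (Int × Int × Int)) : Prop :=
  (P.map (fun e => (e.1, e.2.1))).Nodup
instance (P : List (Int × Int × Int)) : Decidable (Pre_relabel_stable P) := by
  unfold Pre_relabel_stable; infer_instance
def pvWitness_relabel_stable : (List (Int × Int × Int)) := [(0, 0, 5), (0, 1, 5), (1, 0, 3)]

def Spec_relabel_stable (P : List (Int × Int × Int)) (out : List (Int × Int × Int)) : Prop := out = relabel_stable_alt P
instance (P : List (Int × Int × Int)) (out : List (Int × Int × Int)) : Decidable (Spec_relabel_stable P out) := by unfold Spec_relabel_stable; infer_instance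

-- ===== CLAIM (what is proved, stated in full; the proofs are below) =====
def Claim_equal_relabel_stable : Prop := ∀ (P : List (Int × Int × Int)), Dom_relabel_stable P → Pre_relabel_stable P → Spec_relabel_stable P (relabel_stable P)

-- ===== LEMMAS AND PROOFS =====
-- abbreviations used only by the proofs
def pvKB (e : Int × Int × Int) : (Int ×ₗ Int) ×ₗ Int := toLex (toLex (e.1, e.2.1), e.2.2)
def pvBids (P : List (Int × Int × Int)) : List Int := P.map (fun e => e.2.2)
def pvBs (P : List (Int × Int × Int)) : List Int := PySem.Set.ofList (pvBids P)
def pvGrp (P : List (Int × Int × Int)) (b : Int) : List (Int × Int) :=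
  ((P.map (fun e => (e.2.2, (e.1, e.2.1)))).filter (fun p => p.1 == b)).map (fun p => p.2)
def pvMp (P : List (Int × Int × Int)) (b : Int) : Int × Int :=
  (PySem.List.min? (pvGrp P b) (fun r => (toLex r : Int ×ₗ Int))).getD (0, 0)
def pvReps (P : List (Int × Int × Int)) : List ((Int × Int) × Int) :=
  (pvBs P).map (fun b => (pvMp P b, b))
def pvSR (P : List (Int × Int × Int)) : List ((Int × Int) × Int) :=
  PySem.List.sorted (pvReps P) (fun r => (toLex (toLex r.1, r.2) : (Int ×ₗ Int) ×ₗ Int))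
def pvT (P : List (Int × Int × Int)) : List Int := (pvSR P).map (fun r => r.2)
def pvAd (P : List (Int × Int × Int)) : PySem.Dict Int Int :=
  (PySem.List.enumerate (pvSR P)).foldl (fun d q => d.insert q.2.2 q.1) PySem.Dict.empty
def pvS (P : List (Int × Int × Int)) : List (Int × Int × Int) :=
  PySem.List.sorted P (fun e => (toLex (toLex (e.1, e.2.1), e.2.2) : (Int ×ₗ Int) ×ₗ Int))
def pvW (P : List (Int × Int × Int)) : List Int := PySem.Set.ofList ((pvS P).map (fun e => e.2.2))
def pvBd (P : List (Int × Int × Int)) : PySem.Dict Int Int :=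
  (pvS P).foldl (fun d e => if d.contains e.2.2 then d else d.insert e.2.2 (d.size : Int)) PySem.Dict.empty

lemma pvBody_eq (d : PySem.Dict Int (List (Int × Int))) (e : Int × Int × Int) :
    (let d1 := if d.contains e.2.2 then d else d.insert e.2.2 []
     d1.modify e.2.2 [] (fun l => l ++ [(e.1, e.2.1)])) =
    d.modify e.2.2 [] (fun l => l ++ [(e.1, e.2.1)]) := by
  by_cases h : d.contains e.2.2
  · simp [h]
  · simp only [Bool.not_eq_true] at h
    simp [h, PySem.Dict.modify, PySem.Dict.insert_insert_self, PySem.Dict.getD_insert_self,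
      PySem.Dict.getD_of_not_contains d _ h]

lemma pvBlocks_getD (P : List (Int × Int × Int)) (b : Int) :
    (P.foldl (fun d e =>
        let d1 := if d.contains e.2.2 then d else d.insert e.2.2 []
        d1.modify e.2.2 [] (fun l => l ++ [(e.1, e.2.1)])) PySem.Dict.empty).getD b []
      = pvGrp P b := by
  have h1 : (P.foldl (fun d e =>
        let d1 := if d.contains e.2.2 then d else d.insert e.2.2 []
        d1.modify e.2.2 [] (fun l => l ++ [(e.1, e.2.1)])) PySem.Dict.empty)
      = (P.map (fun e => (e.2.2, (e.1, e.2.1)))).foldl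
          (fun d p => d.modify p.1 [] (fun l => l ++ [p.2])) PySem.Dict.empty := by
    rw [List.foldl_map]
    exact PySem.List.foldl_congr_mem _ _ _ _ (fun d e _ => pvBody_eq d e)
  rw [h1, PySem.Dict.getD_foldl_modify_append]
  simp [pvGrp]

lemma pvBlocks_keys (P : List (Int × Int × Int)) :
    (P.foldl (fun d e =>
        let d1 := if d.contains e.2.2 then d else d.insert e.2.2 []
        d1.modify e.2.2 [] (fun l => l ++ [(e.1, e.2.1)])) PySem.Dict.empty).keys
      = pvBs P := by
  have h1 : (P.foldl (fun d e =>
        let d1 := if d.contains e.2.2 then d else d.insert e.2.2 []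
        d1.modify e.2.2 [] (fun l => l ++ [(e.1, e.2.1)])) PySem.Dict.empty)
      = P.foldl (fun d e => d.modify e.2.2 [] (fun l => l ++ [(e.1, e.2.1)])) PySem.Dict.empty :=
    PySem.List.foldl_congr_mem _ _ _ _ (fun d e _ => pvBody_eq d e)
  rw [h1]
  have := PySem.Dict.keys_foldl_modify_key P (fun e => e.2.2) []
      (fun _ e => (fun l => l ++ [(e.1, e.2.1)])) PySem.Dict.empty
  rw [this]
  simp [pvBs, pvBids, PySem.Dict.keys_empty, PySem.Set.update_nil_left]

lemma pvMem_grp (P : List (Int × Int × Int)) (b : Int) (q : Int × Int) :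
    q ∈ pvGrp P b ↔ ∃ e ∈ P, e.2.2 = b ∧ (e.1, e.2.1) = q := by
  simp [pvGrp]

lemma pvGrp_ne_nil (P : List (Int × Int × Int)) (b : Int) (hb : b ∈ pvBids P) :
    pvGrp P b ≠ [] := by
  simp only [pvBids, List.mem_map] at hb
  obtain ⟨e, he, hbe⟩ := hb
  intro hnil
  have : (e.1, e.2.1) ∈ pvGrp P b := (pvMem_grp P b _).mpr ⟨e, he, hbe, rfl⟩
  rw [hnil] at this; exact absurd this (List.not_mem_nil)

lemma pvMp_spec (P : List (Int × Int × Int)) (b : Int) (hb : b ∈ pvBids P) :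
    pvMp P b ∈ pvGrp P b ∧ ∀ q ∈ pvGrp P b, (toLex (pvMp P b) : Int ×ₗ Int) ≤ toLex q := by
  have hne := pvGrp_ne_nil P b hb
  obtain ⟨m, hm⟩ : ∃ m, PySem.List.min? (pvGrp P b) (fun r => (toLex r : Int ×ₗ Int)) = some m := by
    cases h : PySem.List.min? (pvGrp P b) (fun r => (toLex r : Int ×ₗ Int)) with
    | none => exact absurd ((PySem.List.min?_eq_none_iff _ _).mp h) hne
    | some m => exact ⟨m, rfl⟩
  have hmp : pvMp P b = m := by simp [pvMp, hm]
  rw [hmp]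
  exact ⟨PySem.List.min?_mem hm, PySem.List.min?_isMin hm⟩

lemma pvMp_inj (P : List (Int × Int × Int)) (hPre : Pre_relabel_stable P)
    (b b' : Int) (hb : b ∈ pvBids P) (hb' : b' ∈ pvBids P) (h : pvMp P b = pvMp P b') :
    b = b' := by
  obtain ⟨e, he, hbe, hqe⟩ := (pvMem_grp P b _).mp (pvMp_spec P b hb).1
  obtain ⟨e', he', hbe', hqe'⟩ := (pvMem_grp P b' _).mp (pvMp_spec P b' hb').1
  have hpos : (fun x => (x.1, x.2.1)) e = (fun x => (x.1, x.2.1)) e' := by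
    simp only; rw [hqe, hqe', h]
  have := List.inj_on_of_nodup_map hPre he he' hpos
  rw [← hbe, ← hbe', this]

lemma pvA_eq (P : List (Int × Int × Int)) (h : P ≠ []) :
    relabel_stable P = P.map (fun e => (e.1, e.2.1, (pvAd P).getD e.2.2 0)) := by
  rw [relabel_stable, if_neg h]
  have hkeys := pvBlocks_keys P
  have hnd : (P.foldl (fun d e =>
        let d1 := if d.contains e.2.2 then d else d.insert e.2.2 []
        d1.modify e.2.2 [] (fun l => l ++ [(e.1, e.2.1)])) PySem.Dict.empty).keys.Nodup := by
    rw [hkeys]; exact PySem.Set.nodup_ofList _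
  have hitems := PySem.Dict.items_eq_map_keys _ hnd []
  rw [hkeys] at hitems
  simp only [hitems, List.map_map]
  have hreps : ((pvBs P).map ((fun q =>
      ((PySem.List.min? q.2 (fun r => (toLex r : Int ×ₗ Int))).getD (0, 0), q.1)) ∘
      (fun k => (k, (P.foldl (fun d e =>
        let d1 := if d.contains e.2.2 then d else d.insert e.2.2 []
        d1.modify e.2.2 [] (fun l => l ++ [(e.1, e.2.1)])) PySem.Dict.empty).getD k []))))
      = pvReps P := by
    apply List.map_congr_left
    intro b _
    simp [Function.comp, pvBlocks_getD P b, pvMp]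
  rw [hreps]
  rfl

lemma pvB_eq (P : List (Int × Int × Int)) :
    relabel_stable_alt P = P.map (fun e => (e.1, e.2.1, (pvBd P).getD e.2.2 0)) := rfl

lemma pvReps_nodup (P : List (Int × Int × Int)) : (pvReps P).Nodup := by
  apply List.Nodup.map _ (PySem.Set.nodup_ofList _)
  intro b b' h
  exact congrArg Prod.snd h

lemma pvMem_SR (P : List (Int × Int × Int)) (r : (Int × Int) × Int) (h : r ∈ pvSR P) :
    r = (pvMp P r.2, r.2) ∧ r.2 ∈ pvBids P := by
  have : r ∈ pvReps P := (PySem.List.sorted_perm _ _ _).mem_iff.mp h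
  simp only [pvReps, List.mem_map] at this
  obtain ⟨b, hb, rfl⟩ := this
  exact ⟨rfl, (PySem.Set.mem_ofList _ _).mp hb⟩

lemma pvT_perm_bs (P : List (Int × Int × Int)) : (pvT P).Perm (pvBs P) := by
  have h1 : (pvT P).Perm ((pvReps P).map (fun r => r.2)) :=
    (PySem.List.sorted_perm _ _ _).map _
  have h2 : (pvReps P).map (fun r => r.2) = pvBs P := by
    simp [pvReps, List.map_map, Function.comp_def]
  rw [h2] at h1; exact h1

lemma pvNodup_T (P : List (Int × Int × Int)) : (pvT P).Nodup := by
  exact (pvT_perm_bs P).nodup_iff.mpr (PySem.Set.nodup_ofList _)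

lemma pvSR_pairwise (P : List (Int × Int × Int)) (hPre : Pre_relabel_stable P) :
    (pvSR P).Pairwise (fun r r' => (toLex (pvMp P r.2) : Int ×ₗ Int) < toLex (pvMp P r'.2)) := by
  have h1 := PySem.List.sorted_pairwise (pvReps P)
      (fun r => (toLex (toLex r.1, r.2) : (Int ×ₗ Int) ×ₗ Int))
  have hnd : (pvSR P).Nodup :=
    (PySem.List.sorted_perm _ _ _).nodup_iff.mpr (pvReps_nodup P)
  have h2 : (pvSR P).Pairwise (fun r r' => r ≠ r') := hnd
  have h3 := List.Pairwise.and_mem.mp (h1.and h2)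
  apply h3.imp
  intro r r' ⟨hr, hr', hle, hne⟩
  obtain ⟨hrE, hrB⟩ := pvMem_SR P r hr
  obtain ⟨hrE', hrB'⟩ := pvMem_SR P r' hr'
  rcases Prod.Lex.le_iff.mp hle with hlt | ⟨heq, _⟩
  · rw [hrE, hrE'] at hlt ⊢
    simpa using hlt
  · exfalso
    have h4 : r.1 = r'.1 := by
      have := congrArg ofLex heq; simpa using this
    have h5 : pvMp P r.2 = pvMp P r'.2 := by
      rw [hrE, hrE'] at h4; simpa using h4
    have := pvMp_inj P hPre r.2 r'.2 hrB hrB' h5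
    apply hne
    rw [hrE, hrE', this]

lemma pvAd_lookup (P : List (Int × Int × Int)) (i : Nat) (h : i < (pvT P).length) :
    (pvAd P).getD ((pvT P)[i]) 0 = (i : Int) := by
  have hlen : i < (pvSR P).length := by simpa [pvT] using h
  have hmapk : (PySem.List.enumerate (pvSR P)).map (fun q => q.2.2) = pvT P := by
    have := PySem.List.map_snd_enumerate (pvSR P) 0
    calc (PySem.List.enumerate (pvSR P)).map (fun q => q.2.2)
        = ((PySem.List.enumerate (pvSR P)).map (fun q => q.2)).map (fun r => r.2) := by
          rw [List.map_map]; rfl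
      _ = pvT P := by rw [this]; rfl
  have hitems := PySem.Dict.items_foldl_insert_fresh (PySem.List.enumerate (pvSR P))
      (fun q => q.2.2) (fun q => q.1) PySem.Dict.empty
      (fun a _ => PySem.Dict.contains_empty _)
      (by rw [hmapk]; exact pvNodup_T P)
  have hAd : (pvAd P).items = (PySem.List.enumerate (pvSR P)).map (fun q => (q.2.2, q.1)) := by
    rw [pvAd, hitems]; rfl
  have hknd : (pvAd P).keys.Nodup := by
    have : (pvAd P).keys = pvT P := by
      show (pvAd P).items.map (fun p => p.1) = pvT P
      rw [hAd, List.map_map, ← hmapk]; rfl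
    rw [this]; exact pvNodup_T P
  have hlen2 : i < (PySem.List.enumerate (pvSR P)).length := by
    rw [PySem.List.length_enumerate]; exact hlen
  have hmem : ((pvT P)[i], (i : Int)) ∈ (pvAd P).items := by
    rw [hAd]
    have hlen3 : i < ((PySem.List.enumerate (pvSR P)).map (fun q => (q.2.2, q.1))).length := by
      rw [List.length_map]; exact hlen2
    have : ((PySem.List.enumerate (pvSR P)).map (fun q => (q.2.2, q.1)))[i]'hlen3 =
        ((pvT P)[i], (i : Int)) := by
      rw [List.getElem_map, PySem.List.getElem_enumerate]
      simp [pvT]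
    rw [← this]
    exact List.getElem_mem _
  exact PySem.Dict.getD_of_mem_items _ hmem hknd 0

lemma pvStep_keys (d : PySem.Dict Int Int) (e : Int × Int × Int) :
    (if d.contains e.2.2 then d else d.insert e.2.2 (d.size : Int)).keys
      = PySem.Set.add d.keys e.2.2 := by
  by_cases h : d.contains e.2.2
  · rw [if_pos h, PySem.Set.add, if_pos]
    simpa [List.contains_iff_mem] using (PySem.Dict.contains_iff_mem_keys d e.2.2).mp h
  · rw [if_neg h, PySem.Set.add, if_neg, PySem.Dict.keys_insert_of_not_contains]
    · exact Bool.not_eq_true _ ▸ (by simpa using h)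
    · intro hc
      exact h ((PySem.Dict.contains_iff_mem_keys d e.2.2).mpr (by simpa [List.contains_iff_mem] using hc))

lemma pvBfold (l : List (Int × Int × Int)) (d : PySem.Dict Int Int)
    (hv : ∀ j (h : j < d.items.length), (d.items[j]).2 = (j : Int)) :
    ((l.foldl (fun d e => if d.contains e.2.2 then d else d.insert e.2.2 (d.size : Int)) d).keys
        = PySem.Set.update d.keys (l.map (fun e => e.2.2)))
    ∧ ∀ j (h : j < (l.foldl (fun d e => if d.contains e.2.2 then d else d.insert e.2.2 (d.size : Int)) d).items.length),
        ((l.foldl (fun d e => if d.contains e.2.2 then d else d.insert e.2.2 (d.size : Int)) d).items[j]).2 = (j : Int) := by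
  induction l generalizing d with
  | nil => exact ⟨by simp [PySem.Set.update_nil], hv⟩
  | cons e l ih =>
    have hv' : ∀ j (h : j < (if d.contains e.2.2 then d else d.insert e.2.2 (d.size : Int)).items.length),
        ((if d.contains e.2.2 then d else d.insert e.2.2 (d.size : Int)).items[j]).2 = (j : Int) := by
      by_cases h : d.contains e.2.2
      · simpa [h] using hv
      · rw [if_neg h, PySem.Dict.items_insert_of_not_contains d _ (by simpa using h)]
        intro j hj
        rcases Nat.lt_or_ge j d.items.length with hlt | hge
        · rw [List.getElem_append_left hlt]; exact hv j hlt
        · have hj' : j = d.items.length := by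
            simp only [List.length_append, List.length_cons, List.length_nil] at hj
            omega
          subst hj'
          rw [List.getElem_append_right (Nat.le_refl _)]
          simp [PySem.Dict.size]
    obtain ⟨hk, hval⟩ := ih _ hv'
    refine ⟨?_, hval⟩
    rw [List.map_cons, PySem.Set.update_cons, ← pvStep_keys d e]
    exact hk

lemma pvBd_keys (P : List (Int × Int × Int)) : (pvBd P).keys = pvW P := by
  have := (pvBfold (pvS P) PySem.Dict.empty (by intro j hj; simp [PySem.Dict.empty] at hj)).1
  rw [pvBd, this]
  simp [pvW, PySem.Dict.keys_empty, PySem.Set.update_nil_left]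

lemma pvBd_lookup (P : List (Int × Int × Int)) (i : Nat) (h : i < (pvW P).length) :
    (pvBd P).getD ((pvW P)[i]) 0 = (i : Int) := by
  have hval := (pvBfold (pvS P) PySem.Dict.empty (by intro j hj; simp [PySem.Dict.empty] at hj)).2
  have hkeys := pvBd_keys P
  have hklen : (pvBd P).items.length = (pvW P).length := by
    rw [← hkeys]; simp [PySem.Dict.keys]
  have hi : i < (pvBd P).items.length := hklen ▸ h
  have hfst : ((pvBd P).items[i]).1 = (pvW P)[i] := by
    have : (pvBd P).items.map (fun p => p.1) = pvW P := hkeys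
    calc ((pvBd P).items[i]).1
        = ((pvBd P).items.map (fun p => p.1))[i]'(by rw [List.length_map]; exact hi) := by
          rw [List.getElem_map]
      _ = (pvW P)[i] := by congr 1
  have hsnd : ((pvBd P).items[i]).2 = (i : Int) := hval i hi
  have hmem : ((pvW P)[i], (i : Int)) ∈ (pvBd P).items := by
    rw [← hfst, ← hsnd]
    exact List.getElem_mem _
  exact PySem.Dict.getD_of_mem_items _ hmem (by rw [hkeys]; exact PySem.Set.nodup_ofList _) 0

lemma pvDedup_dom (l : List (Int × Int × Int))
    (hp : l.Pairwise (fun e e' => pvKB e < pvKB e')) :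
    (PySem.Set.ofList (l.map (fun e => e.2.2))).Pairwise
      (fun b b' => ∀ e ∈ l, e.2.2 = b' → ∃ e' ∈ l, e'.2.2 = b ∧ pvKB e' < pvKB e) := by
  induction l with
  | nil => simp [PySem.Set.ofList, PySem.Set.empty]
  | cons e l ih =>
    rw [List.map_cons, PySem.Set.ofList_cons]
    rw [List.pairwise_cons] at hp
    constructor
    · intro b' hb' f hf hbf
      have hb'ne : b' ≠ e.2.2 := ((PySem.Set.mem_discard _ _ _).mp hb').2
      have hfl : f ∈ l := by
        rcases List.mem_cons.mp hf with rfl | hfl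
        · exact absurd hbf (by simpa [eq_comm] using hb'ne)
        · exact hfl
      exact ⟨e, List.mem_cons_self, rfl, hp.1 f hfl⟩
    · have hih := ih hp.2
      have hsub : List.Sublist ((PySem.Set.ofList (l.map (fun e => e.2.2))).discard e.2.2)
          (PySem.Set.ofList (l.map (fun e => e.2.2))) := List.filter_sublist
      have h2 := List.Pairwise.and_mem.mp (hih.sublist hsub)
      apply h2.imp
      intro b b' ⟨hb, hb', hrel⟩
      have hbne : b ≠ e.2.2 := ((PySem.Set.mem_discard _ _ _).mp hb).2
      have hb'ne : b' ≠ e.2.2 := ((PySem.Set.mem_discard _ _ _).mp hb').2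
      intro f hf hbf
      have hfl : f ∈ l := by
        rcases List.mem_cons.mp hf with rfl | hfl
        · exact absurd hbf (by simpa [eq_comm] using hb'ne)
        · exact hfl
      obtain ⟨e', he', hbe', hlt⟩ := hrel f hfl hbf
      exact ⟨e', List.mem_cons_of_mem _ he', hbe', hlt⟩

lemma pvS_pairwise (P : List (Int × Int × Int)) (hPre : Pre_relabel_stable P) :
    (pvS P).Pairwise (fun e e' => pvKB e < pvKB e') := by
  have h1 := PySem.List.sorted_pairwise P
      (fun e => (toLex (toLex (e.1, e.2.1), e.2.2) : (Int ×ₗ Int) ×ₗ Int))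
  have hPnd : P.Nodup := hPre.of_map
  have h2 : (pvS P).Pairwise (fun e e' => e ≠ e') :=
    (PySem.List.sorted_perm _ _ _).nodup_iff.mpr hPnd
  apply (h1.and h2).imp
  intro e e' ⟨hle, hne⟩
  apply lt_of_le_of_ne hle
  intro hk
  apply hne
  have h1 : e.1 = e'.1 := by
    have := congrArg (fun x => (ofLex (ofLex x).1).1) hk
    simpa [pvKB] using this
  have h2 : e.2.1 = e'.2.1 := by
    have := congrArg (fun x => (ofLex (ofLex x).1).2) hk
    simpa [pvKB] using this
  have h3 : e.2.2 = e'.2.2 := by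
    have := congrArg (fun x => (ofLex x).2) hk
    simpa [pvKB] using this
  exact Prod.ext h1 (Prod.ext h2 h3)

lemma pvPos_mem_grp (P : List (Int × Int × Int)) (e : Int × Int × Int) (he : e ∈ P) :
    (e.1, e.2.1) ∈ pvGrp P e.2.2 := (pvMem_grp P _ _).mpr ⟨e, he, rfl, rfl⟩

lemma pvW_pairwise (P : List (Int × Int × Int)) (hPre : Pre_relabel_stable P) :
    (pvW P).Pairwise (fun b b' => (toLex (pvMp P b) : Int ×ₗ Int) < toLex (pvMp P b')) := by
  have hdom := pvDedup_dom (pvS P) (pvS_pairwise P hPre)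
  have hWnd : (pvW P).Nodup := PySem.Set.nodup_ofList _
  have h2 : (pvW P).Pairwise (fun b b' => b ≠ b') := hWnd
  have h3 := List.Pairwise.and_mem.mp (hdom.and h2)
  apply h3.imp
  intro b b' ⟨hbW, hb'W, hdom2, hne⟩
  -- b' occurs in P, so its minimal position comes from an entry e of block b'
  have hb'P : b' ∈ pvBids P := by
    have : b' ∈ (pvS P).map (fun e => e.2.2) := (PySem.Set.mem_ofList _ _).mp hb'W
    obtain ⟨e, he, rfl⟩ := List.mem_map.mp this
    exact List.mem_map_of_mem ((PySem.List.sorted_perm _ _ _).mem_iff.mp he)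
  have hbP : b ∈ pvBids P := by
    have : b ∈ (pvS P).map (fun e => e.2.2) := (PySem.Set.mem_ofList _ _).mp hbW
    obtain ⟨e, he, rfl⟩ := List.mem_map.mp this
    exact List.mem_map_of_mem ((PySem.List.sorted_perm _ _ _).mem_iff.mp he)
  obtain ⟨e, heP, hbe, hpe⟩ := (pvMem_grp P b' _).mp (pvMp_spec P b' hb'P).1
  have heS : e ∈ pvS P := (PySem.List.sorted_perm _ _ _).mem_iff.mpr heP
  obtain ⟨e', he'S, hbe', hlt⟩ := hdom2 e heS hbe
  have he'P : e' ∈ P := (PySem.List.sorted_perm _ _ _).mem_iff.mp he'S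
  -- mp b ≤ pos e'
  have h4 : (toLex (pvMp P b) : Int ×ₗ Int) ≤ toLex (e'.1, e'.2.1) :=
    (pvMp_spec P b hbP).2 _ (hbe' ▸ pvPos_mem_grp P e' he'P)
  -- pos e' < pos e = mp b'
  have h5 : (toLex (e'.1, e'.2.1) : Int ×ₗ Int) < toLex (e.1, e.2.1) := by
    rcases Prod.Lex.lt_iff.mp hlt with hlt1 | ⟨heq, _⟩
    · simpa using hlt1
    · exfalso
      have hpos : (fun x => (x.1, x.2.1)) e' = (fun x => (x.1, x.2.1)) e := by
        have := congrArg ofLex heq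
        simpa [pvKB, Prod.ext_iff] using this
      have := List.inj_on_of_nodup_map hPre he'P heP hpos
      rw [this] at hbe'
      exact hne (hbe' ▸ hbe ▸ rfl)
  rw [hpe] at h5
  exact lt_of_le_of_lt h4 h5

lemma pvT_eq_W (P : List (Int × Int × Int)) (hPre : Pre_relabel_stable P) :
    pvT P = pvW P := by
  have hTp : (pvT P).Pairwise (fun b b' => (toLex (pvMp P b) : Int ×ₗ Int) < toLex (pvMp P b')) :=
    List.pairwise_map.mpr (pvSR_pairwise P hPre)
  have hWp := pvW_pairwise P hPre
  have hperm : (pvT P).Perm (pvW P) := by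
    rw [List.perm_ext_iff_of_nodup (pvNodup_T P) (by rw [pvW]; exact PySem.Set.nodup_ofList _)]
    intro b
    rw [(pvT_perm_bs P).mem_iff, pvBs, PySem.Set.mem_ofList, pvW, PySem.Set.mem_ofList]
    constructor
    · intro h
      obtain ⟨e, he, rfl⟩ := List.mem_map.mp h
      exact List.mem_map_of_mem ((PySem.List.sorted_perm _ _ _).mem_iff.mpr he)
    · intro h
      obtain ⟨e, he, rfl⟩ := List.mem_map.mp h
      exact List.mem_map_of_mem ((PySem.List.sorted_perm _ _ _).mem_iff.mp he)
  exact List.Perm.eq_of_pairwise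
    (fun a b _ _ h1 h2 => absurd h2 (lt_asymm h1)) hTp hWp hperm

-- ===== VERDICT (by name: the statement is the Claim_ definition above) =====
theorem relabel_stable_spec : Claim_equal_relabel_stable := by
  intro P _hD hPre
  unfold Spec_relabel_stable
  by_cases h : P = []
  · subst h; rfl
  · rw [pvA_eq P h, pvB_eq P]
    apply List.map_congr_left
    intro e he
    have hb : e.2.2 ∈ pvBids P := List.mem_map_of_mem he
    have hbs : e.2.2 ∈ pvBs P := by rw [pvBs]; exact (PySem.Set.mem_ofList _ _).mpr hb
    have hbT : e.2.2 ∈ pvT P := (pvT_perm_bs P).mem_iff.mpr hbs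
    obtain ⟨i, hi, hiT⟩ := List.mem_iff_getElem.mp hbT
    have hA := pvAd_lookup P i hi
    have hiW : i < (pvW P).length := by rw [← pvT_eq_W P hPre]; exact hi
    have hB := pvBd_lookup P i hiW
    rw [hiT] at hA
    rw [← List.getElem_of_eq (pvT_eq_W P hPre) hi, hiT] at hB
    rw [hA, hB]
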